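-- pv_equiv track=rewrite | github.com/Tomiczeq/KSMAP | python_scripts/evaluate.py | getPredictable
-- ===== SOURCE A (Python) =====
-- def getPredictable(timeline):
--
--     predictable = 0
--     for k, v in timeline[1].items():
--         if not isinstance(k, int):
--             continue
--         if len(v) == 1 and -2 not in v:
--             predictable += 1
--         elif len(v) > 1:
--             st = set(v)
--             if -2 in st:
--                 st.remove(-2)
--
--             if len(st) > 0:
--                 predictable += 1
--
--     return predictable
-- ===== SOURCE B (Python) =====
-- def getPredictable(timeline):
--     values = [v for k, v in timeline[1].items() if isinstance(k, int)]
--     unpredictable = sum(1 for v in values if all(x == -2 for x in v))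
--     return len(values) - unpredictable
-- ===== Notes on version B (the rewrite author's own statement) =====
-- stated objective: simpler
-- what changed: B counts by complement in two staged passes: collect the int-keyed values, count the unpredictable ones (all elements equal -2, including empty), and return len minus that count, instead of A's single loop with a two-branch len-split building a set; no set is built.
import Mathlib
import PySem

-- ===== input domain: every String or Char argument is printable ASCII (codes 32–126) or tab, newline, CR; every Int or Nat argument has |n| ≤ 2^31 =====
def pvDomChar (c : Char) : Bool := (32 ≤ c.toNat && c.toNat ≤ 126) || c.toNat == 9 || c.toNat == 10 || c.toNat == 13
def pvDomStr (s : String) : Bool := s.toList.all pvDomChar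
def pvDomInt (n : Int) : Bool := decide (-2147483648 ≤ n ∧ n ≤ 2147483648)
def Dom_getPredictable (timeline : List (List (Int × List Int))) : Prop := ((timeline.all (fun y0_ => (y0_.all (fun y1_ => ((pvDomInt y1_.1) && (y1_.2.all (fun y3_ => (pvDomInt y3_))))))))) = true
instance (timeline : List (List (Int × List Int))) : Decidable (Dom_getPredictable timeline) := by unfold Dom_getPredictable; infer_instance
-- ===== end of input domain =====

-- B counts by complement: len(int-keyed values) minus the count of all-(-2) values,
-- in two staged passes instead of A's single two-branch set-building loop: simpler, same cost.

-- ===== PORT A =====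
-- timeline[1].items(); isinstance(k, int) is always true for keys of type Int,
-- so the 'continue' branch never fires at this type.
def getPredictable (timeline : List (List (Int × List Int))) : Int :=
  match PySem.List.pyGet? timeline 1 with
  | none => 0  -- IndexError in Python; excluded by Pre_getPredictable
  | some d =>
    (PySem.Dict.ofList d).items.foldl (fun predictable kv =>
      let v := kv.2
      if v.length = 1 ∧ (-2 : Int) ∉ v then predictable + 1
      else if v.length > 1 then
        let st : PySem.Set Int := PySem.Set.ofList v
        let st := if PySem.Set.contains st (-2) then PySem.Set.discard st (-2) else st
        if PySem.Set.len st > 0 then predictable + 1 else predictable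
      else predictable) 0

-- ===== PORT B =====
-- the comprehension guard isinstance(k, int) is always true at this type, so it keeps every entry
def getPredictable_alt (timeline : List (List (Int × List Int))) : Int :=
  match PySem.List.pyGet? timeline 1 with
  | none => 0  -- IndexError in Python; excluded by Pre_getPredictable
  | some d =>
    let values := (PySem.Dict.ofList d).items.map (fun kv => kv.2)
    let unpredictable : Int :=
      values.foldl (fun s v => if v.all (fun x => x = -2) then s + 1 else s) 0
    (values.length : Int) - unpredictable

-- ===== PRECONDITION & SPEC =====
-- Pre_ excludes only lists with fewer than 2 elements, where timeline[1] raises IndexError.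
def Pre_getPredictable (timeline : List (List (Int × List Int))) : Prop := 2 ≤ timeline.length
instance (timeline : List (List (Int × List Int))) : Decidable (Pre_getPredictable timeline) := by unfold Pre_getPredictable; infer_instance
def pvWitness_getPredictable : (List (List (Int × List Int))) := [[], [(0, [1]), (1, [-2])]]

def Spec_getPredictable (timeline : List (List (Int × List Int))) (out : Int) : Prop := out = getPredictable_alt timeline
instance (timeline : List (List (Int × List Int))) (out : Int) : Decidable (Spec_getPredictable timeline out) := by unfold Spec_getPredictable; infer_instance

-- ===== CLAIM (what is proved, stated in full; the proofs are below) =====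
def Claim_equal_getPredictable : Prop := ∀ (timeline : List (List (Int × List Int))), Dom_getPredictable timeline → Pre_getPredictable timeline → Spec_getPredictable timeline (getPredictable timeline)

-- ===== LEMMAS AND PROOFS =====

-- A's set-based test for len(v) > 1 is "v has some element ≠ -2".
lemma set_side_iff (v : List Int) :
    (0 < PySem.Set.len (if PySem.Set.contains (PySem.Set.ofList v) (-2) then
        PySem.Set.discard (PySem.Set.ofList v) (-2) else PySem.Set.ofList v)) ↔
    ∃ x ∈ v, x ≠ -2 := by
  split_ifs with hc
  · rw [PySem.Set.len, Int.natCast_pos, List.length_pos_iff_exists_mem]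
    constructor
    · rintro ⟨y, hy⟩
      rw [PySem.Set.mem_discard, PySem.Set.mem_ofList] at hy
      exact ⟨y, hy.1, hy.2⟩
    · rintro ⟨y, hy, hne⟩
      exact ⟨y, by rw [PySem.Set.mem_discard, PySem.Set.mem_ofList]; exact ⟨hy, hne⟩⟩
  · rw [PySem.Set.contains_iff, PySem.Set.mem_ofList] at hc
    rw [PySem.Set.len, Int.natCast_pos, List.length_pos_iff_exists_mem]
    constructor
    · rintro ⟨y, hy⟩
      rw [PySem.Set.mem_ofList] at hy
      exact ⟨y, hy, fun h => hc (h ▸ hy)⟩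
    · rintro ⟨y, hy, _⟩
      exact ⟨y, by rw [PySem.Set.mem_ofList]; exact hy⟩

-- A's per-entry step adds 1 exactly when v is not all (-2)s (and nonempty).
lemma step_eq (acc : Int) (v : List Int) :
    (if v.length = 1 ∧ (-2 : Int) ∉ v then acc + 1
     else if v.length > 1 then
       (if 0 < PySem.Set.len (if PySem.Set.contains (PySem.Set.ofList v) (-2) then
            PySem.Set.discard (PySem.Set.ofList v) (-2) else PySem.Set.ofList v)
        then acc + 1 else acc)
     else acc) =
    (if v.all (fun x => x = -2) then acc else acc + 1) := by
  match v with
  | [] => simp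
  | [x] =>
    by_cases h : x = -2 <;> simp [h, eq_comm]
  | x :: y :: xs =>
    have h1 : (x :: y :: xs).length = 1 ∧ (-2 : Int) ∉ (x :: y :: xs) ↔ False := by
      simp
    rw [if_congr h1 rfl rfl, if_false, if_pos (by simp)]
    by_cases h : ∃ z ∈ x :: y :: xs, z ≠ -2
    · obtain ⟨z, hz, hne⟩ := h
      have hb : ¬ (((x :: y :: xs).all fun w => decide (w = -2)) = true) := by
        simp only [List.all_eq_true, decide_eq_true_eq]
        exact fun hall => hne (hall z hz)
      rw [if_pos ((set_side_iff _).mpr ⟨z, hz, hne⟩), if_neg hb]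
    · have hall : ∀ z ∈ x :: y :: xs, z = -2 := by
        intro z hz
        by_contra hne
        exact h ⟨z, hz, hne⟩
      have hb : (((x :: y :: xs).all fun w => decide (w = -2)) = true) := by
        simp only [List.all_eq_true, decide_eq_true_eq]
        exact hall
      rw [if_neg (fun hh => h ((set_side_iff _).mp hh)), if_pos hb]

-- A's fold equals length minus B's unpredictable count, over any list of values.
-- the unpredictable-count fold starting from b equals b plus the same fold from 0
lemma foldl_shift (l : List (List Int)) (b : Int) :
    l.foldl (fun s v => if v.all (fun x => x = -2) then s + 1 else s) b =
    b + l.foldl (fun s v => if v.all (fun x => x = -2) then s + 1 else s) 0 := by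
  induction l generalizing b with
  | nil => simp
  | cons w ws ihw =>
    simp only [List.foldl_cons]
    by_cases hw : ((w.all fun x => decide (x = -2)) = true)
    · rw [if_pos hw, if_pos hw, ihw (b + 1), ihw ((0 : Int) + 1)]
      ring
    · rw [if_neg hw, if_neg hw, ihw b]

-- A's fold equals length minus B's unpredictable count, over any list of values.
lemma foldl_complement (l : List (List Int)) (acc : Int) :
    l.foldl (fun c v => if v.all (fun x => x = -2) then c else c + 1) acc =
    acc + (l.length : Int) -
      l.foldl (fun s v => if v.all (fun x => x = -2) then s + 1 else s) 0 := by
  induction l generalizing acc with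
  | nil => simp
  | cons v rest ih =>
    simp only [List.foldl_cons, List.length_cons]
    rw [ih]
    by_cases hv : ((v.all fun x => decide (x = -2)) = true)
    · rw [if_pos hv, if_pos hv, foldl_shift rest ((0 : Int) + 1)]
      push_cast
      ring
    · rw [if_neg hv, if_neg hv]
      push_cast
      ring

-- A's loop, rewritten step-by-step to the complement form, over the same entries.
lemma foldl_eq (l : List (Int × List Int)) :
    l.foldl (fun predictable kv =>
      let v := kv.2
      if v.length = 1 ∧ (-2 : Int) ∉ v then predictable + 1
      else if v.length > 1 then
        let st : PySem.Set Int := PySem.Set.ofList v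
        let st := if PySem.Set.contains st (-2) then PySem.Set.discard st (-2) else st
        if PySem.Set.len st > 0 then predictable + 1 else predictable
      else predictable) 0 =
    ((l.map (fun kv => kv.2)).length : Int) -
      (l.map (fun kv => kv.2)).foldl
        (fun s v => if v.all (fun x => x = -2) then s + 1 else s) 0 := by
  have h : ∀ acc : Int, l.foldl (fun predictable kv =>
      let v := kv.2
      if v.length = 1 ∧ (-2 : Int) ∉ v then predictable + 1
      else if v.length > 1 then
        let st : PySem.Set Int := PySem.Set.ofList v
        let st := if PySem.Set.contains st (-2) then PySem.Set.discard st (-2) else st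
        if PySem.Set.len st > 0 then predictable + 1 else predictable
      else predictable) acc =
      (l.map (fun kv => kv.2)).foldl
        (fun c v => if v.all (fun x => x = -2) then c else c + 1) acc := by
    intro acc
    induction l generalizing acc with
    | nil => rfl
    | cons kv rest ih =>
      simp only [List.foldl_cons, List.map_cons]
      rw [step_eq acc kv.2, ih]
  rw [h 0, foldl_complement]
  simp

-- ===== VERDICT (by name: the statement is the Claim_ definition above) =====
theorem getPredictable_spec : Claim_equal_getPredictable := by
  intro timeline _ _
  unfold Spec_getPredictable getPredictable getPredictable_alt
  cases h : PySem.List.pyGet? timeline 1 with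
  | none => rfl
  | some d =>
    simp only
    rw [foldl_eq]
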